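-- pv_equiv track=rewrite | github.com/sealinglip/leecode | interview/面试题 16.18. 模式匹配.py | patternMatching
-- ===== SOURCE A (Python) =====
-- from collections import Counter
--
-- def patternMatching(pattern: str, value: str) -> bool:
--     if not pattern:
--         return False if value else True
--
--     p_len, v_len = len(pattern), len(value)
--     counter = Counter(pattern)
--     if len(counter) == 1: # 只有一种模式
--         a_len = v_len // p_len
--         if a_len * p_len != v_len:
--             return False
--         else:
--             a, i = value[0:a_len], a_len
--             while i < v_len:
--                 if value[i : i + a_len] != a:
--                     return False
--                 i += a_len
--             return True
--     else:
--         a_len_max = v_len // counter['a'] # 模式a匹配的子串最大可能长度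
--         for a_len in range(a_len_max + 1):
--             b_len = (v_len - counter['a'] * a_len) // counter['b']
--             # 如果不能被整除，那么试下一种可能
--             if a_len * counter['a'] + b_len * counter['b'] != v_len:
--                 continue
--             # 验证是不是靠谱
--             a, b, i = '', '', 0
--             match = True
--             for p in pattern:
--                 if p == 'a':
--                     if a:
--                         if a != value[i : i + a_len]:
--                             match = False
--                             break
--                     elif a_len != 0:
--                         a = value[i : i + a_len]
--                 else:
--                     if b:
--                         if b != value[i : i + b_len]:
--                             match = False
--                             break
--                     elif b_len != 0:
--                         b = value[i : i + b_len]
--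
--                 i += a_len if p == 'a' else b_len
--             if match and a != b:
--                 return True
--
--         return False
-- ===== SOURCE B (Python) =====
-- def patternMatching(pattern: str, value: str) -> bool:
--     if not pattern:
--         return not value
--     if len(set(pattern)) == 1:
--         q, r = divmod(len(value), len(pattern))
--         return r == 0 and value == value[:q] * len(pattern)
--     return _dfs(pattern, value, None, None)
--
--
-- def _dfs(ps: str, vs: str, a, b) -> bool:
--     # backtracking assignment search: bind each letter to a prefix the first
--     # time it is met; afterwards just consume its bound string
--     while ps:
--         s = a if ps[0] == 'a' else b
--         if s is None:
--             for j in range(len(vs) + 1):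
--                 t = vs[:j]
--                 if ps[0] == 'a':
--                     if _dfs(ps[1:], vs[j:], t, b):
--                         return True
--                 elif _dfs(ps[1:], vs[j:], a, t):
--                     return True
--             return False
--         if not vs.startswith(s):
--             return False
--         ps, vs = ps[1:], vs[len(s):]
--     return not vs and a != b
-- ===== Notes on version B (the rewrite author's own statement) =====
-- stated objective: alternative
-- what changed: For the two-letter case B drops A's arithmetic enumeration of a_len with division-derived b_len and lockstep verification scan, and instead runs a backtracking search that binds each letter to a candidate prefix of the remaining value at its first occurrence and thereafter just consumes the binding; no counting and no division is involved.
-- outside the precondition, e.g. on patternMatching('aabc', 'xxyy'): A returns False, B returns True; on patternMatching('ac', 'xy'): A raises ZeroDivisionError, B returns True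
import Mathlib
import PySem

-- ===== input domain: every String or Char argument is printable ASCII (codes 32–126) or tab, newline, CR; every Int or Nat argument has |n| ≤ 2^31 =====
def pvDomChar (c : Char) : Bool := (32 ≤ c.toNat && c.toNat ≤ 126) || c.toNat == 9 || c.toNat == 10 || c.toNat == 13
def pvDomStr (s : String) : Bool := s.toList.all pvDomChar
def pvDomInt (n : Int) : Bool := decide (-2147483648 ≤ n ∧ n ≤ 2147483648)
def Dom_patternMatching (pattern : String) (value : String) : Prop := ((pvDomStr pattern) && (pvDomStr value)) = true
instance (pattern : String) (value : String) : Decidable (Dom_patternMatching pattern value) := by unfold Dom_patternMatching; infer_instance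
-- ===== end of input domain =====

-- B replaces A's arithmetic enumeration of candidate lengths (a_len loop, division-derived b_len,
-- lockstep verification scan) by a recursive backtracking search that binds each letter to a
-- candidate prefix at its first occurrence and thereafter just consumes the binding
-- (objective: alternative algorithm; not claimed faster).

-- ===== PORT A =====
-- the inner verification loop of A ('for p in pattern: …' with state a, b, i, early break);
-- returns (match, a, b)
def pmScanA (vs : List Char) (aLen bLen : Int) :
    List Char → List Char → List Char → Int → Bool × List Char × List Char
  | [], a, b, _ => (true, a, b)
  | p :: ps, a, b, i =>
    if p = 'a' then
      if a ≠ [] then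
        if a ≠ PySem.List.slice vs (some i) (some (i + aLen)) then (false, a, b)
        else pmScanA vs aLen bLen ps a b (i + aLen)
      else
        if aLen ≠ 0 then
          pmScanA vs aLen bLen ps (PySem.List.slice vs (some i) (some (i + aLen))) b (i + aLen)
        else pmScanA vs aLen bLen ps a b (i + aLen)
    else
      if b ≠ [] then
        if b ≠ PySem.List.slice vs (some i) (some (i + bLen)) then (false, a, b)
        else pmScanA vs aLen bLen ps a b (i + bLen)
      else
        if bLen ≠ 0 then
          pmScanA vs aLen bLen ps a (PySem.List.slice vs (some i) (some (i + bLen))) (i + bLen)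
        else pmScanA vs aLen bLen ps a b (i + bLen)

def patternMatching (pattern : String) (value : String) : Bool :=
  let ps := pattern.toList
  let vs := value.toList
  if ps = [] then (if vs ≠ [] then false else true)
  else
    let pLen : Int := PySem.List.len ps
    let vLen : Int := PySem.List.len vs
    let counter := PySem.Dict.counter ps
    if counter.size = 1 then
      let aLen := PySem.Int.floordiv vLen pLen
      if aLen * pLen ≠ vLen then false
      else
        let a := PySem.List.slice vs (some 0) (some aLen)
        -- 'a, i = value[0:a_len], a_len; while i < v_len: …; i += a_len' —
        -- rendered as the equal-stepping range over the same iterates (empty when a_len = 0, where v_len = 0)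
        (PySem.List.pyRange aLen vLen aLen).all fun i =>
          PySem.List.slice vs (some i) (some (i + aLen)) == a
    else
      let cA : Int := counter.getD 'a' 0
      let cB : Int := counter.getD 'b' 0
      let aLenMax := PySem.Int.floordiv vLen cA
      -- 'for a_len in range(a_len_max + 1): … return True … return False' = any over the range
      (PySem.List.pyRange 0 (aLenMax + 1) 1).any fun aLen =>
        let bLen := PySem.Int.floordiv (vLen - cA * aLen) cB
        if aLen * cA + bLen * cB ≠ vLen then false
        else
          match pmScanA vs aLen bLen ps [] [] 0 with
          | (m, a, b) => m && a != b

-- ===== PORT B =====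
-- _dfs of Source B: bind each letter to a prefix at first occurrence, then consume bindings;
-- 'for j in range(len(vs)+1): … return True … return False' = any over the range;
-- vs.startswith(s) = List.isPrefixOf (exact on lists of chars)
def pmDfs : List Char → List Char → Option (List Char) → Option (List Char) → Bool
  | [], vs, a, b => vs.isEmpty && (a != b)
  | p :: ps, vs, a, b =>
    match (if p = 'a' then a else b) with
    | some s => s.isPrefixOf vs && pmDfs ps (vs.drop s.length) a b
    | none =>
      (List.range (vs.length + 1)).any fun j =>
        if p = 'a' then pmDfs ps (vs.drop j) (some (vs.take j)) b
        else pmDfs ps (vs.drop j) a (some (vs.take j))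

def patternMatching_alt (pattern : String) (value : String) : Bool :=
  let ps := pattern.toList
  let vs := value.toList
  if ps = [] then vs.isEmpty
  else
    if PySem.Set.len (PySem.Set.ofList ps) = 1 then
      let aLen := PySem.Int.floordiv (PySem.List.len vs) (PySem.List.len ps)
      let rem := PySem.Int.mod (PySem.List.len vs) (PySem.List.len ps)
      rem == 0 && vs == (List.replicate ps.length (PySem.List.slice vs none (some aLen))).flatten
    else
      pmDfs ps vs none none

-- ===== PRECONDITION & SPEC =====
-- Pre_ restricts multi-letter patterns to the problem's stated alphabet {'a','b'}: outside it A
-- either raises ZeroDivisionError (pattern missing 'a' or 'b') or, when it returns, its value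
-- (it counts only 'b' for the length equation while the scan gives every non-'a' character b's
-- width) is an accident of the implementation; single-distinct-character patterns are all kept.
def Pre_patternMatching (pattern : String) (value : String) : Prop :=
  (PySem.Set.ofList pattern.toList).length ≤ 1 ∨
    pattern.toList.all (fun c => c == 'a' || c == 'b') = true
instance (pattern : String) (value : String) : Decidable (Pre_patternMatching pattern value) := by
  unfold Pre_patternMatching; infer_instance

def pvWitness_patternMatching : String × String := ("ab", "xy")

def Spec_patternMatching (pattern : String) (value : String) (out : Bool) : Prop :=
  out = patternMatching_alt pattern value
instance (pattern : String) (value : String) (out : Bool) :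
    Decidable (Spec_patternMatching pattern value out) := by
  unfold Spec_patternMatching; infer_instance

-- ===== CLAIM (what is proved, stated in full; the proofs are below) =====
def Claim_equal_patternMatching : Prop :=
  ∀ (pattern : String) (value : String), Dom_patternMatching pattern value →
    Pre_patternMatching pattern value →
    Spec_patternMatching pattern value (patternMatching pattern value)

-- ===== LEMMAS AND PROOFS =====
-- ''.join over the pattern with widths |α|, |β| — the common reference value both ports match
def pmExpand (a b : List Char) (ps : List Char) : List Char :=
  ps.flatMap fun c => if c = 'a' then a else b

def pmSeg (vs : List Char) (i l : Nat) : List Char := (vs.drop i).take l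
def pmWdt (al bl : Nat) (c : Char) : Nat := if c = 'a' then al else bl
def pmFstOff (al bl : Nat) (q : Char → Bool) : List Char → Nat → Option Nat
  | [], _ => none
  | c :: ps, i => if q c then some i else pmFstOff al bl q ps (i + pmWdt al bl c)
def pmRep (vs : List Char) (al bl l : Nat) (q : Char → Bool) (ps : List Char) (i : Nat)
    (a : List Char) : List Char :=
  if a ≠ [] then a
  else match pmFstOff al bl q ps i with
       | some j => pmSeg vs j l
       | none => a
def pmScanN (vs : List Char) (al bl : Nat) :
    List Char → List Char → List Char → Nat → Bool × List Char × List Char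
  | [], a, b, _ => (true, a, b)
  | p :: ps, a, b, i =>
    if p = 'a' then
      if a ≠ [] then
        if a ≠ pmSeg vs i al then (false, a, b)
        else pmScanN vs al bl ps a b (i + al)
      else
        if al ≠ 0 then pmScanN vs al bl ps (pmSeg vs i al) b (i + al)
        else pmScanN vs al bl ps a b (i + al)
    else
      if b ≠ [] then
        if b ≠ pmSeg vs i bl then (false, a, b)
        else pmScanN vs al bl ps a b (i + bl)
      else
        if bl ≠ 0 then pmScanN vs al bl ps a (pmSeg vs i bl) (i + bl)
        else pmScanN vs al bl ps a b (i + bl)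
lemma pmFstOff_ge (al bl : Nat) (q : Char → Bool) :
    ∀ (ps : List Char) (i j : Nat), pmFstOff al bl q ps i = some j → i ≤ j := by
  intro ps
  induction ps with
  | nil => intro i j h; simp [pmFstOff] at h
  | cons c ps ih =>
    intro i j h
    simp only [pmFstOff] at h
    split_ifs at h with hq
    · cases h; omega
    · have := ih _ _ h; omega
-- helper: the established-rep step
lemma pmSeg_split (vs : List Char) (i l : Nat) :
    vs.drop i = pmSeg vs i l ++ vs.drop (i + l) := by
  conv_lhs => rw [← List.take_append_drop l (vs.drop i)]
  rw [List.drop_drop]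
  simp [pmSeg, Nat.add_comm]

-- empty segments stay empty to the right
lemma pmSeg_empty_mono (vs : List Char) {i j l : Nat} (hij : i ≤ j)
    (h : pmSeg vs i l = []) : pmSeg vs j l = [] := by
  simp only [pmSeg, List.take_eq_nil_iff, List.drop_eq_nil_iff] at h ⊢
  rcases h with h | h
  · exact Or.inl h
  · omega

lemma pmScan_main (vs : List Char) (al bl : Nat) (α β : List Char) :
    ∀ (ps a b : List Char) (i : Nat),
      pmRep vs al bl al (· = 'a') ps i a = α →
      pmRep vs al bl bl (· != 'a') ps i b = β →
      (a ≠ [] → a.length = al ∨ vs.length ≤ i) →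
      (b ≠ [] → b.length = bl ∨ vs.length ≤ i) →
      vs.length ≤ i + (ps.map (pmWdt al bl)).sum →
      (pmScanN vs al bl ps a b i).1 = decide (vs.drop i = pmExpand α β ps) ∧
      ((pmScanN vs al bl ps a b i).1 = true → (pmScanN vs al bl ps a b i).2 = (α, β)) := by
  intro ps
  induction ps with
  | nil =>
    intro a b i hA hB _ _ hfull
    simp only [List.map_nil, List.sum_nil, Nat.add_zero] at hfull
    have hdrop : vs.drop i = [] := List.drop_eq_nil_iff.mpr hfull
    have hα : a = α := by simpa [pmRep, pmFstOff] using hA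
    have hβ : b = β := by simpa [pmRep, pmFstOff] using hB
    refine ⟨by simp [pmScanN, hdrop, pmExpand], by intro _; simp [pmScanN, hα, hβ]⟩
  | cons p ps ih =>
    intro a b i hA hB hWa hWb hfull
    by_cases hp : p = 'a'
    · subst hp
      -- head is 'a'
      have hfull' : vs.length ≤ (i + al) + (ps.map (pmWdt al bl)).sum := by
        have hw : pmWdt al bl 'a' = al := by simp [pmWdt]
        rw [List.map_cons, List.sum_cons, hw] at hfull; omega
      have hexp : pmExpand α β ('a' :: ps) = α ++ pmExpand α β ps := by
        simp [pmExpand]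
      by_cases ha : a = []
      · -- establishment step: α is the segment here
        subst ha
        have hα : α = pmSeg vs i al := by
          simp [pmRep, pmFstOff] at hA; exact hA.symm
        have hstep : pmScanN vs al bl ('a' :: ps) [] b i = pmScanN vs al bl ps (pmSeg vs i al) b (i + al) := by
          by_cases hz : al = 0
          · subst hz; simp [pmScanN, pmSeg]
          · simp [pmScanN, hz]
        -- IH hypotheses at the new state
        have hA' : pmRep vs al bl al (· = 'a') ps (i + al) (pmSeg vs i al) = α := by
          by_cases hse : pmSeg vs i al = []
          · rw [hse]
            simp only [pmRep, ne_eq, not_true_eq_false, if_false]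
            cases hf : pmFstOff al bl (· = 'a') ps (i + al) with
            | none => simp [hα, hse]
            | some j =>
              have hij : i ≤ j := le_trans (Nat.le_add_right _ _) (pmFstOff_ge _ _ _ _ _ _ hf)
              show pmSeg vs j al = α
              rw [hα, hse]
              exact pmSeg_empty_mono vs hij hse
          · simp [pmRep, hse, hα]
        have hB' : pmRep vs al bl bl (· != 'a') ps (i + al) b = β := by
          simpa [pmRep, pmFstOff, pmWdt] using hB
        have hWa' : pmSeg vs i al ≠ [] → (pmSeg vs i al).length = al ∨ vs.length ≤ i + al := by
          intro _
          simp only [pmSeg, List.length_take, List.length_drop]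
          omega
        have hWb' : b ≠ [] → b.length = bl ∨ vs.length ≤ i + al := by
          intro h; rcases hWb h with h' | h'
          · exact Or.inl h'
          · exact Or.inr (le_trans h' (Nat.le_add_right _ _))
        obtain ⟨ih1, ih2⟩ := ih (pmSeg vs i al) b (i + al) hA' hB' hWa' hWb' hfull'
        rw [hstep, hexp]
        constructor
        · rw [ih1]
          have hsplit := pmSeg_split vs i al
          rw [show vs.drop i = pmSeg vs i al ++ vs.drop (i + al) from hsplit, hα]
          simp
        · exact ih2
      · -- established: a = α
        have hα : a = α := by simp [pmRep, ha] at hA; exact hA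
        have hB' : pmRep vs al bl bl (· != 'a') ps (i + al) b = β := by
          simpa [pmRep, pmFstOff, pmWdt] using hB
        by_cases heq : a = pmSeg vs i al
        · have hstep : pmScanN vs al bl ('a' :: ps) a b i = pmScanN vs al bl ps a b (i + al) := by
            simp [pmScanN, ha, heq]
          have hA' : pmRep vs al bl al (· = 'a') ps (i + al) a = α := by
            unfold pmRep; rw [if_pos ha]; exact hα
          have hWa' : a ≠ [] → a.length = al ∨ vs.length ≤ i + al := by
            intro h; rcases hWa h with h' | h'
            · exact Or.inl h'
            · exact Or.inr (le_trans h' (Nat.le_add_right _ _))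
          have hWb' : b ≠ [] → b.length = bl ∨ vs.length ≤ i + al := by
            intro h; rcases hWb h with h' | h'
            · exact Or.inl h'
            · exact Or.inr (le_trans h' (Nat.le_add_right _ _))
          obtain ⟨ih1, ih2⟩ := ih a b (i + al) hA' hB' hWa' hWb' hfull'
          rw [hstep, hexp]
          constructor
          · rw [ih1]
            rw [show vs.drop i = pmSeg vs i al ++ vs.drop (i + al) from pmSeg_split vs i al, ← heq, hα]
            simp
          · exact ih2
        · -- mismatch: scan fails; reconstruction also fails
          have hstep : pmScanN vs al bl ('a' :: ps) a b i = (false, a, b) := by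
            simp [pmScanN, ha, heq]
          rw [hstep, hexp]
          refine ⟨?_, by intro h; cases h⟩
          symm
          simp only [decide_eq_false_iff_not]
          intro hcontra
          -- vs.drop i = α ++ rest, α = a ≠ []
          rcases hWa ha with hlen | hge
          · -- a has full length al, so the first al chars of vs.drop i are a
            apply heq
            have hlα : α.length = al := by rw [hα] at hlen; exact hlen
            have h1 : (α ++ pmExpand α β ps).take al = α := by
              rw [List.take_append_of_le_length (le_of_eq hlα.symm), ← hlα, List.take_length]
            rw [hα, show pmSeg vs i al = (α ++ pmExpand α β ps).take al by simp [pmSeg, hcontra], h1]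
          · -- past the end: vs.drop i = [], so α = [], contradicting a ≠ []
            have : vs.drop i = [] := List.drop_eq_nil_iff.mpr hge
            rw [this] at hcontra
            have : α = [] := by
              have := congrArg List.length hcontra
              simp at this
              exact List.eq_nil_of_length_eq_zero (by omega)
            exact ha (hα ▸ this)
    · -- head is not 'a' (symmetric)
      have hfull' : vs.length ≤ (i + bl) + (ps.map (pmWdt al bl)).sum := by
        have hw : pmWdt al bl p = bl := by simp [pmWdt, hp]
        rw [List.map_cons, List.sum_cons, hw] at hfull; omega
      have hpb : (p != 'a') = true := by simpa using hp
      have hexp : pmExpand α β (p :: ps) = β ++ pmExpand α β ps := by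
        simp [pmExpand, hp]
      have hA' : pmRep vs al bl al (· = 'a') ps (i + bl) a = α := by
        simpa [pmRep, pmFstOff, pmWdt, hp] using hA
      by_cases hb : b = []
      · subst hb
        have hβ : β = pmSeg vs i bl := by
          simp [pmRep, pmFstOff, hpb] at hB; exact hB.symm
        have hstep : pmScanN vs al bl (p :: ps) a [] i = pmScanN vs al bl ps a (pmSeg vs i bl) (i + bl) := by
          by_cases hz : bl = 0
          · subst hz; simp [pmScanN, hp, pmSeg]
          · simp [pmScanN, hp, hz]
        have hB' : pmRep vs al bl bl (· != 'a') ps (i + bl) (pmSeg vs i bl) = β := by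
          by_cases hse : pmSeg vs i bl = []
          · rw [hse]
            simp only [pmRep, ne_eq, not_true_eq_false, if_false]
            cases hf : pmFstOff al bl (· != 'a') ps (i + bl) with
            | none => simp [hβ, hse]
            | some j =>
              have hij : i ≤ j := le_trans (Nat.le_add_right _ _) (pmFstOff_ge _ _ _ _ _ _ hf)
              show pmSeg vs j bl = β
              rw [hβ, hse]
              exact pmSeg_empty_mono vs hij hse
          · simp [pmRep, hse, hβ]
        have hWb' : pmSeg vs i bl ≠ [] → (pmSeg vs i bl).length = bl ∨ vs.length ≤ i + bl := by
          intro _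
          simp only [pmSeg, List.length_take, List.length_drop]
          omega
        have hWa' : a ≠ [] → a.length = al ∨ vs.length ≤ i + bl := by
          intro h; rcases hWa h with h' | h'
          · exact Or.inl h'
          · exact Or.inr (le_trans h' (Nat.le_add_right _ _))
        obtain ⟨ih1, ih2⟩ := ih a (pmSeg vs i bl) (i + bl) hA' hB' hWa' hWb' hfull'
        rw [hstep, hexp]
        constructor
        · rw [ih1]
          rw [show vs.drop i = pmSeg vs i bl ++ vs.drop (i + bl) from pmSeg_split vs i bl, hβ]
          simp
        · exact ih2
      · have hβ : b = β := by simp [pmRep, hb, hpb] at hB; exact hB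
        by_cases heq : b = pmSeg vs i bl
        · have hstep : pmScanN vs al bl (p :: ps) a b i = pmScanN vs al bl ps a b (i + bl) := by
            simp [pmScanN, hp, hb, heq]
          have hB' : pmRep vs al bl bl (· != 'a') ps (i + bl) b = β := by
            unfold pmRep; rw [if_pos hb]; exact hβ
          have hWa' : a ≠ [] → a.length = al ∨ vs.length ≤ i + bl := by
            intro h; rcases hWa h with h' | h'
            · exact Or.inl h'
            · exact Or.inr (le_trans h' (Nat.le_add_right _ _))
          have hWb' : b ≠ [] → b.length = bl ∨ vs.length ≤ i + bl := by
            intro h; rcases hWb h with h' | h'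
            · exact Or.inl h'
            · exact Or.inr (le_trans h' (Nat.le_add_right _ _))
          obtain ⟨ih1, ih2⟩ := ih a b (i + bl) hA' hB' hWa' hWb' hfull'
          rw [hstep, hexp]
          constructor
          · rw [ih1]
            rw [show vs.drop i = pmSeg vs i bl ++ vs.drop (i + bl) from pmSeg_split vs i bl, ← heq, hβ]
            simp
          · exact ih2
        · have hstep : pmScanN vs al bl (p :: ps) a b i = (false, a, b) := by
            simp [pmScanN, hp, hb, heq]
          rw [hstep, hexp]
          refine ⟨?_, by intro h; cases h⟩
          symm
          simp only [decide_eq_false_iff_not]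
          intro hcontra
          rcases hWb hb with hlen | hge
          · apply heq
            have hlβ : β.length = bl := by rw [hβ] at hlen; exact hlen
            have h1 : (β ++ pmExpand α β ps).take bl = β := by
              rw [List.take_append_of_le_length (le_of_eq hlβ.symm), ← hlβ, List.take_length]
            rw [hβ, show pmSeg vs i bl = (β ++ pmExpand α β ps).take bl by simp [pmSeg, hcontra], h1]
          · have : vs.drop i = [] := List.drop_eq_nil_iff.mpr hge
            rw [this] at hcontra
            have : β = [] := by
              have := congrArg List.length hcontra
              simp at this
              exact List.eq_nil_of_length_eq_zero (by omega)
            exact hb (hβ ▸ this)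

lemma pm_sum_wdt' (al bl : Nat) (ps : List Char) :
    (ps.map (pmWdt al bl)).sum = ps.count 'a' * al + ps.countP (· != 'a') * bl := by
  induction ps with
  | nil => simp
  | cons c ps ih =>
    by_cases hc : c = 'a'
    · subst hc; simp [pmWdt, List.count_cons, List.countP_cons, ih]; ring
    · have h1 : (c != 'a') = true := by simpa using hc
      have h2 : ¬ (c == 'a') = true := by simpa using hc
      simp [pmWdt, List.count_cons, List.countP_cons, hc, h1, h2, ih]; ring

lemma pmFstOff_first_a (al bl : Nat) :
    ∀ (ps : List Char) (i : Nat), 'a' ∈ ps →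
      pmFstOff al bl (· = 'a') ps i = some (i + ps.idxOf 'a' * bl) := by
  intro ps
  induction ps with
  | nil => simp
  | cons c ps ih =>
    intro i hm
    by_cases hc : c = 'a'
    · subst hc; simp [pmFstOff, List.idxOf_cons_self]
    · have hm' : 'a' ∈ ps := by
        cases hm with
        | head => exact absurd rfl hc
        | tail _ h => exact h
      rw [List.idxOf_cons_ne _ (by simpa using hc)]
      simp only [pmFstOff, pmWdt, decide_eq_true_eq, if_neg hc]
      rw [ih _ hm']
      congr 1
      simp [Nat.succ_mul]
      ring

lemma pmFstOff_first_o (al bl : Nat) :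
    ∀ (ps : List Char) (i : Nat), 'b' ∈ ps →
      pmFstOff al bl (· != 'a') ps i = some (i + ps.findIdx (· != 'a') * al) := by
  intro ps
  induction ps with
  | nil => simp
  | cons c ps ih =>
    intro i hm
    by_cases hc : c = 'a'
    · subst hc
      have hm' : 'b' ∈ ps := by
        rcases List.mem_cons.mp hm with h | h
        · exact absurd h (by decide)
        · exact h
      simp only [pmFstOff, pmWdt, List.findIdx_cons]
      norm_num
      rw [ih _ hm']
      congr 1
      ring
    · have h1 : (c != 'a') = true := by simpa using hc
      simp [pmFstOff, List.findIdx_cons, h1]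


lemma pm_candidate (vs ps : List Char) (al bl : Nat)
    (ha : 'a' ∈ ps) (hb : 'b' ∈ ps)
    (hsum : vs.length ≤ ps.count 'a' * al + ps.count 'b' * bl) :
    ((pmScanN vs al bl ps [] [] 0).1 &&
      ((pmScanN vs al bl ps [] [] 0).2.1 != (pmScanN vs al bl ps [] [] 0).2.2)) =
    (let a := pmSeg vs (ps.idxOf 'a' * bl) al
     let b := pmSeg vs (ps.findIdx (· != 'a') * al) bl
     (a != b && (vs == pmExpand a b ps))) := by
  have hfa := pmFstOff_first_a al bl ps 0 ha
  have hfo := pmFstOff_first_o al bl ps 0 hb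
  set α := pmSeg vs (ps.idxOf 'a' * bl) al with hαdef
  set β := pmSeg vs (ps.findIdx (· != 'a') * al) bl with hβdef
  have hA : pmRep vs al bl al (· = 'a') ps 0 [] = α := by
    unfold pmRep
    rw [if_neg (by simp), hfa]
    simp [hαdef]
  have hB : pmRep vs al bl bl (· != 'a') ps 0 [] = β := by
    unfold pmRep
    rw [if_neg (by simp), hfo]
    simp [hβdef]
  have hfull : vs.length ≤ 0 + (ps.map (pmWdt al bl)).sum := by
    rw [pm_sum_wdt' al bl ps]
    have hcb : ps.count 'b' ≤ ps.countP (· != 'a') := by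
      rw [List.count]
      apply List.countP_mono_left
      intro c _ hcb
      simp at hcb ⊢
      rw [hcb]; decide
    have := Nat.mul_le_mul_right bl hcb
    omega
  obtain ⟨h1, h2⟩ := pmScan_main vs al bl α β ps [] [] 0 hA hB (by simp) (by simp) hfull
  simp only [List.drop_zero] at h1
  cases hm : (pmScanN vs al bl ps [] [] 0).1 with
  | true =>
    have hpair := h2 hm
    have hdec : (vs == pmExpand α β ps) = true := by
      have := hm.symm.trans h1
      simpa [beq_iff_eq] using this.symm
    have e1 : (pmScanN vs al bl ps [] [] 0).2.1 = α := by rw [hpair]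
    have e2 : (pmScanN vs al bl ps [] [] 0).2.2 = β := by rw [hpair]
    rw [e1, e2]
    show (true && (α != β)) = ((α != β) && (vs == pmExpand α β ps))
    rw [hdec]
    simp [Bool.and_comm]
  | false =>
    have hdec : (vs == pmExpand α β ps) = false := by
      have := hm.symm.trans h1
      simpa [beq_iff_eq] using this.symm
    show false = _
    show false = ((α != β) && (vs == pmExpand α β ps))
    rw [hdec]
    simp


lemma pm_chunks (al : Nat) :
    ∀ (pl : Nat) (vs a : List Char), a.length = al → vs.length = al * pl →
      ((List.range pl).all fun k => pmSeg vs (al * k) al == a) =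
      (vs == (List.replicate pl a).flatten) := by
  intro pl
  induction pl with
  | zero =>
    intro vs a _ hv
    have : vs = [] := List.eq_nil_of_length_eq_zero (by simpa using hv)
    simp [this]
  | succ pl ih =>
    intro vs a hal hv
    rw [List.range_succ_eq_map]
    have hlen : al ≤ vs.length := by rw [hv, Nat.mul_succ]; omega
    have hstep : ∀ k, pmSeg vs (al * (k + 1)) al = pmSeg (vs.drop al) (al * k) al := by
      intro k
      unfold pmSeg
      rw [List.drop_drop]
      have : al * (k + 1) = al * k + al := by ring
      rw [this, Nat.add_comm]
    have hv' : (vs.drop al).length = al * pl := by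
      rw [List.length_drop, hv, Nat.mul_succ]; omega
    have hinner : ((List.range pl).map (· + 1)).all (fun k => pmSeg vs (al * k) al == a)
        = (vs.drop al == (List.replicate pl a).flatten) := by
      rw [List.all_map]
      have : ((fun k => pmSeg vs (al * k) al == a) ∘ (· + 1))
           = fun k => pmSeg (vs.drop al) (al * k) al == a := by
        funext k; simp [Function.comp, hstep]
      rw [this, ih (vs.drop al) a hal hv']
    simp only [List.all_cons, hinner]
    have hseg0 : pmSeg vs (al * 0) al = vs.take al := by simp [pmSeg]
    rw [hseg0]
    have hflat : (List.replicate (pl + 1) a).flatten = a ++ (List.replicate pl a).flatten := by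
      rw [List.replicate_succ, List.flatten_cons]
    rw [hflat]
    -- (take al vs == a) && (drop al vs == F)  =  vs == a ++ F
    rw [Bool.eq_iff_iff]
    simp only [Bool.and_eq_true, beq_iff_eq]
    constructor
    · rintro ⟨h1, h2⟩
      rw [← List.take_append_drop al vs, h1, h2]
    · intro h
      constructor
      · rw [h, List.take_append_of_le_length (le_of_eq hal.symm), ← hal, List.take_length]
      · rw [h, List.drop_append_of_le_length (le_of_eq hal.symm), ← hal, List.drop_length]
        simp

lemma pmScanA_cast (vs : List Char) (al bl : Nat) :
    ∀ (ps a b : List Char) (i : Nat),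
      pmScanA vs (al : Int) (bl : Int) ps a b (i : Int) = pmScanN vs al bl ps a b i := by
  intro ps
  induction ps with
  | nil => intro a b i; simp [pmScanA, pmScanN]
  | cons p ps ih =>
    intro a b i
    have hsl : ∀ (l : Nat), PySem.List.slice vs (some (i : Int)) (some ((i : Int) + (l : Int))) = pmSeg vs i l := by
      intro l; rw [PySem.List.slice_natCast_add]; rfl
    have hca : ((i : Int) + (al : Int)) = ((i + al : Nat) : Int) := by push_cast; ring
    have hcb : ((i : Int) + (bl : Int)) = ((i + bl : Nat) : Int) := by push_cast; ring
    simp only [pmScanA, pmScanN, hsl, Nat.cast_ne_zero]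
    split_ifs <;> first | rfl | (rw [hca]; apply ih) | (rw [hcb]; apply ih)

lemma pm_single (vs : List Char) (al pl : Nat) (hpl : 0 < pl) (hv : vs.length = al * pl) :
    ((PySem.List.pyRange (al : Int) (vs.length : Int) (al : Int)).all fun i =>
      PySem.List.slice vs (some i) (some (i + (al : Int))) == vs.take al) =
    (vs == (List.replicate pl (vs.take al)).flatten) := by
  by_cases hal : al = 0
  · subst hal
    have hv0 : vs = [] := by
      have : vs.length = 0 := by omega
      exact List.eq_nil_of_length_eq_zero this
    subst hv0
    have hr : PySem.List.pyRange ((0 : Nat) : Int) (([] : List Char).length : Int) ((0 : Nat) : Int) = [] := by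
      norm_num
      decide
    rw [hr]
    simp only [List.all_nil]
    symm
    rw [beq_iff_eq]
    symm
    rw [List.flatten_eq_nil_iff]
    intro l hl
    simp only [List.eq_of_mem_replicate hl, List.take_nil]
  · have hal0 : 0 < al := Nat.pos_of_ne_zero hal
    have hlen_a : (vs.take al).length = al := by
      rw [List.length_take]
      have : al ≤ vs.length := by
        rw [hv]; calc al = al * 1 := by ring
          _ ≤ al * pl := Nat.mul_le_mul_left al hpl
      omega
    rw [PySem.List.pyRange_of_pos _ _ (by exact_mod_cast hal0)]
    -- compute the iteration count
    have hcount : (if (al : Int) < (vs.length : Int) then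
        (((vs.length : Int) - al + al - 1) / al).toNat else 0) = pl - 1 := by
      by_cases hlt : al < vs.length
      · rw [if_pos (by exact_mod_cast hlt)]
        have hp2 : 2 ≤ pl := by
          rcases (by omega : pl = 1 ∨ 2 ≤ pl) with h | h
          · subst h; simp at hv; omega
          · exact h
        have h1 : ((vs.length : Int) - al + al - 1) = ((al * pl - 1 : Nat) : Int) := by
          have hmn : 1 ≤ al * pl := Nat.mul_pos hal0 hpl
          rw [hv, Nat.cast_sub hmn]
          push_cast
          ring
        rw [h1]
        have h2 : ((al * pl - 1 : Nat) : Int) / (al : Int) = (((al * pl - 1) / al : Nat) : Int) := by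
          rw [Int.natCast_div]
        rw [h2]
        have h3 : (al * pl - 1) / al = pl - 1 := by
          have e : al * (pl - 1) + al = al * pl := by
            cases pl with
            | zero => omega
            | succ n => simp [Nat.mul_succ]
          have he : al * pl - 1 = al * (pl - 1) + (al - 1) := by omega
          rw [he, Nat.mul_add_div hal0, Nat.div_eq_of_lt (by omega)]
          omega
        rw [h3]
        simp
      · rw [if_neg (by exact_mod_cast hlt)]
        have : pl = 1 := by nlinarith [hv, hal0]
        omega
    rw [hcount, List.all_map]
    have hbody : ((fun i => PySem.List.slice vs (some i) (some (i + (al : Int))) == vs.take al)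
          ∘ (fun k : Nat => (al : Int) + (al : Int) * (k : Nat))) =
        (fun k : Nat => pmSeg vs (al * (k + 1)) al == vs.take al) := by
      funext k
      simp only [Function.comp]
      have hcast : ((al : Int) + (al : Int) * (k : Nat)) = ((al * (k + 1) : Nat) : Int) := by
        push_cast; ring
      rw [hcast, PySem.List.slice_natCast_add]
      rfl
    rw [hbody]
    rw [← pm_chunks al pl vs (vs.take al) hlen_a hv]
    -- range pl = 0 :: (range (pl-1)).map (+1)
    obtain ⟨pl', rfl⟩ : ∃ m, pl = m + 1 := ⟨pl - 1, by omega⟩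
    rw [List.range_succ_eq_map, List.all_cons, List.all_map]
    have h0 : (pmSeg vs (al * 0) al == vs.take al) = true := by
      simp [pmSeg]
    rw [h0, Bool.true_and]
    have : ((fun k => pmSeg vs (al * k) al == vs.take al) ∘ (· + 1)) =
        (fun k : Nat => pmSeg vs (al * (k + 1)) al == vs.take al) := by
      funext k; rfl
    rw [this]
    simp

-- ===== new lemmas for the backtracking port =====

lemma pmExpand_length (α β : List Char) (ps : List Char) :
    (pmExpand α β ps).length = (ps.map (pmWdt α.length β.length)).sum := by
  induction ps with
  | nil => simp [pmExpand]
  | cons c ps ih =>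
    by_cases hc : c = 'a' <;>
      simp [pmExpand, pmWdt, hc, List.flatMap_cons, List.length_append] at ih ⊢ <;> omega

lemma pm_count_ab (ps : List Char) (hab : ∀ c ∈ ps, c = 'a' ∨ c = 'b') :
    ps.count 'b' = ps.countP (· != 'a') := by
  induction ps with
  | nil => simp
  | cons c ps ih =>
    have hc := hab c List.mem_cons_self
    have ih' := ih (fun x hx => hab x (List.mem_cons_of_mem c hx))
    rcases hc with h | h <;> subst h <;>
      simp [List.count_cons, List.countP_cons, ih']

lemma pmSeg_shift (x r : List Char) (k l : Nat) :
    pmSeg (x ++ r) (x.length + k) l = pmSeg r k l := by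
  induction x with
  | nil => simp [pmSeg]
  | cons c x ih => simpa [pmSeg, Nat.succ_add] using ih

lemma pmSeg_front (x r : List Char) : pmSeg (x ++ r) 0 x.length = x := by
  unfold pmSeg
  rw [List.drop_zero, List.take_append_of_le_length (le_refl _), List.take_length]

lemma pmSeg_expand_a (α β : List Char) :
    ∀ (ps t : List Char), 'a' ∈ ps →
      pmSeg (pmExpand α β ps ++ t) (ps.idxOf 'a' * β.length) α.length = α := by
  intro ps
  induction ps with
  | nil => simp
  | cons c ps ih =>
    intro t hm
    by_cases hc : c = 'a'
    · subst hc
      rw [List.idxOf_cons_self]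
      have hexp : pmExpand α β ('a' :: ps) ++ t = α ++ (pmExpand α β ps ++ t) := by
        simp [pmExpand]
      rw [hexp]
      simpa using pmSeg_front α (pmExpand α β ps ++ t)
    · have hm' : 'a' ∈ ps := by
        cases hm with
        | head => exact absurd rfl hc
        | tail _ h => exact h
      rw [List.idxOf_cons_ne _ (by simpa using hc)]
      have hexp : pmExpand α β (c :: ps) ++ t = β ++ (pmExpand α β ps ++ t) := by
        simp [pmExpand, hc]
      rw [hexp]
      have hoff : (ps.idxOf 'a' + 1) * β.length = β.length + ps.idxOf 'a' * β.length := by ring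
      rw [hoff, pmSeg_shift]
      exact ih t hm'

lemma pmSeg_expand_b (α β : List Char) :
    ∀ (ps t : List Char), (∃ c ∈ ps, c ≠ 'a') →
      pmSeg (pmExpand α β ps ++ t) (ps.findIdx (· != 'a') * α.length) β.length = β := by
  intro ps
  induction ps with
  | nil => simp
  | cons c ps ih =>
    intro t hm
    by_cases hc : c = 'a'
    · subst hc
      have hm' : ∃ c ∈ ps, c ≠ 'a' := by
        obtain ⟨c', hc', hne⟩ := hm
        rcases List.mem_cons.mp hc' with h | h
        · exact absurd h.symm (Ne.symm hne)
        · exact ⟨c', h, hne⟩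
      have hfi : (('a' : Char) :: ps).findIdx (· != 'a') = ps.findIdx (· != 'a') + 1 := by
        simp [List.findIdx_cons]
      rw [hfi]
      have hexp : pmExpand α β ('a' :: ps) ++ t = α ++ (pmExpand α β ps ++ t) := by
        simp [pmExpand]
      rw [hexp]
      have hoff : (ps.findIdx (· != 'a') + 1) * α.length
          = α.length + ps.findIdx (· != 'a') * α.length := by ring
      rw [hoff, pmSeg_shift]
      exact ih t hm'
    · have h1 : (c != 'a') = true := by simpa using hc
      have hfi : ((c : Char) :: ps).findIdx (· != 'a') = 0 := by
        simp [List.findIdx_cons, h1]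
      rw [hfi]
      have hexp : pmExpand α β (c :: ps) ++ t = β ++ (pmExpand α β ps ++ t) := by
        simp [pmExpand, hc]
      rw [hexp]
      simpa using pmSeg_front β (pmExpand α β ps ++ t)

-- two distinct characters drawn from {'a','b'} means both occur
lemma pm_two_of_ab (ps : List Char) (hab : ∀ c ∈ ps, c = 'a' ∨ c = 'b')
    (h2 : 2 ≤ (PySem.Set.ofList ps).length) : 'a' ∈ ps ∧ 'b' ∈ ps := by
  have hnd : (PySem.Set.ofList ps).Nodup := PySem.Set.nodup_ofList ps
  have hsub : ∀ c ∈ PySem.Set.ofList ps, c ∈ ps := fun c hc => by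
    rwa [PySem.Set.mem_ofList] at hc
  match hS : PySem.Set.ofList ps with
  | [] => rw [hS] at h2; simp at h2
  | [x] => rw [hS] at h2; simp at h2
  | x :: y :: rest =>
    rw [hS] at hnd hsub
    have hxy : x ≠ y := by
      intro h
      subst h
      exact (List.nodup_cons.mp hnd).1 List.mem_cons_self
    have hx := hsub x List.mem_cons_self
    have hy := hsub y (List.mem_cons_of_mem x List.mem_cons_self)
    rcases hab x hx with h1 | h1 <;> rcases hab y hy with h2' | h2' <;>
      first
      | (exact absurd (h1.trans h2'.symm) hxy)
      | (subst h1; subst h2'; exact ⟨hx, hy⟩)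
      | (subst h1; subst h2'; exact ⟨hy, hx⟩)

-- the liveness/distinctness condition carried through the dfs characterisation
def pmLive (sa sb : Bool) (α β : List Char) : Prop :=
  (sa = true → sb = true → α ≠ β) ∧ (sa = true ∨ sb = true)

lemma pm_append_eq_iff (s r vs : List Char) :
    s ++ r = vs ↔ (s.isPrefixOf vs = true ∧ r = vs.drop s.length) := by
  constructor
  · rintro rfl
    refine ⟨List.isPrefixOf_iff_prefix.mpr ⟨r, rfl⟩, ?_⟩
    rw [List.drop_left]
  · rintro ⟨hpre, hr⟩
    obtain ⟨t, ht⟩ := List.isPrefixOf_iff_prefix.mp hpre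
    subst ht
    rw [List.drop_left] at hr
    rw [hr]

lemma pmDfs_iff : ∀ (ps vs : List Char) (a? b? : Option (List Char)),
    pmDfs ps vs a? b? = true ↔
      ∃ α β : List Char,
        (∀ x, a? = some x → x = α) ∧ (∀ x, b? = some x → x = β) ∧
        pmExpand α β ps = vs ∧
        pmLive (a?.isSome || ps.any (· == 'a')) (b?.isSome || ps.any (· != 'a')) α β := by
  intro ps
  induction ps with
  | nil =>
    intro vs a? b?
    constructor
    · intro h
      simp only [pmDfs, Bool.and_eq_true, List.isEmpty_iff, bne_iff_ne, ne_eq] at h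
      obtain ⟨hvs, hne⟩ := h
      subst hvs
      cases a? with
      | none =>
        cases b? with
        | none => exact absurd rfl hne
        | some y =>
          exact ⟨[], y, (by intro x hx; cases hx), (fun x hx => by cases hx; rfl),
            (by simp [pmExpand]), ⟨(by intro h; cases h), Or.inr rfl⟩⟩
      | some x =>
        cases b? with
        | none =>
          exact ⟨x, [], (fun z hz => by cases hz; rfl), (by intro z hz; cases hz),
            (by simp [pmExpand]), ⟨(by intro _ h; cases h), Or.inl rfl⟩⟩
        | some y =>
          have hxy : x ≠ y := fun h => hne (by rw [h])
          exact ⟨x, y, (fun z hz => by cases hz; rfl), (fun z hz => by cases hz; rfl),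
            (by simp [pmExpand]), ⟨(fun _ _ => hxy), Or.inl rfl⟩⟩
    · rintro ⟨α, β, hca, hcb, hex, hlive⟩
      have hvs : vs = [] := by simpa [pmExpand] using hex.symm
      subst hvs
      simp only [pmDfs, Bool.and_eq_true, List.isEmpty_iff, bne_iff_ne, ne_eq]
      refine ⟨by simp, ?_⟩
      cases a? with
      | none =>
        cases b? with
        | none =>
          rcases hlive.2 with h | h <;> simp at h
        | some y => simp
      | some x =>
        cases b? with
        | none => simp
        | some y =>
          have h1 : x = α := hca x rfl
          have h2 : y = β := hcb y rfl
          have : α ≠ β := hlive.1 (by simp) (by simp)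
          intro hcon
          injection hcon with hxy
          exact this (h1 ▸ h2 ▸ hxy)
  | cons p ps ih =>
    intro vs a? b?
    by_cases hp : p = 'a'
    · subst hp
      have hA1 : (('a' :: ps).any (· == 'a')) = true := by simp
      have hB1 : (('a' :: ps).any (· != 'a')) = (ps.any (· != 'a')) := by simp
      cases a? with
      | some s =>
        have hdfs : pmDfs ('a' :: ps) vs (some s) b?
            = (s.isPrefixOf vs && pmDfs ps (vs.drop s.length) (some s) b?) := by
          simp [pmDfs]
        rw [hdfs, Bool.and_eq_true, ih]
        simp only [Option.isSome_some, Bool.true_or, hA1, hB1]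
        constructor
        · rintro ⟨hpre, α, β, hca, hcb, hex, hlive⟩
          have hs : s = α := hca s rfl
          refine ⟨α, β, hca, hcb, ?_, hlive⟩
          have hexp : pmExpand α β ('a' :: ps) = α ++ pmExpand α β ps := by
            simp [pmExpand]
          rw [hexp, hex, ← hs]
          exact ((pm_append_eq_iff s (vs.drop s.length) vs).mpr ⟨hpre, rfl⟩)
        · rintro ⟨α, β, hca, hcb, hex, hlive⟩
          have hs : s = α := hca s rfl
          have hexp : pmExpand α β ('a' :: ps) = α ++ pmExpand α β ps := by
            simp [pmExpand]
          have hex' : s ++ pmExpand α β ps = vs := by rw [hs]; rw [hexp] at hex; exact hex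
          obtain ⟨hpre, hdrop⟩ := (pm_append_eq_iff s (pmExpand α β ps) vs).mp hex'
          exact ⟨hpre, α, β, hca, hcb, hdrop, hlive⟩
      | none =>
        have hdfs : pmDfs ('a' :: ps) vs none b?
            = ((List.range (vs.length + 1)).any fun j =>
                pmDfs ps (vs.drop j) (some (vs.take j)) b?) := by
          simp [pmDfs]
        rw [hdfs, List.any_eq_true]
        simp only [Option.isSome_none, Bool.false_or, hA1, hB1]
        constructor
        · rintro ⟨j, hj, hd⟩
          rw [ih] at hd
          obtain ⟨α, β, hca, hcb, hex, hlive⟩ := hd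
          have hα : vs.take j = α := hca _ rfl
          refine ⟨α, β, (by intro x hx; cases hx), hcb, ?_, ?_⟩
          · have hexp : pmExpand α β ('a' :: ps) = α ++ pmExpand α β ps := by
              simp [pmExpand]
            rw [hexp, hex, ← hα, List.take_append_drop]
          · simpa [Option.isSome_some, Bool.true_or] using hlive
        · rintro ⟨α, β, _, hcb, hex, hlive⟩
          have hexp : pmExpand α β ('a' :: ps) = α ++ pmExpand α β ps := by
            simp [pmExpand]
          rw [hexp] at hex
          refine ⟨α.length, ?_, ?_⟩
          · have := congrArg List.length hex
            simp at this
            simp [List.mem_range]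
            omega
          · rw [ih]
            have h1 : vs.take α.length = α := by
              rw [← hex, List.take_append_of_le_length (le_refl _), List.take_length]
            have h2 : vs.drop α.length = pmExpand α β ps := by
              rw [← hex, List.drop_left]
            refine ⟨α, β, ?_, hcb, h2.symm ▸ rfl, ?_⟩
            · intro x hx; injection hx with hx'; rw [← hx', h1]
            · simpa [Option.isSome_some, Bool.true_or] using hlive
    · -- p ≠ 'a': the b-role, symmetric
      have hpb : (p == 'a') = false := by simpa using hp
      have hpb' : (p != 'a') = true := by simpa using hp
      have hA1 : ((p :: ps).any (· == 'a')) = (ps.any (· == 'a')) := by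
        simp [List.any_cons, hpb]
      have hB1 : ((p :: ps).any (· != 'a')) = true := by
        simp [List.any_cons, hpb']
      cases b? with
      | some s =>
        have hdfs : pmDfs (p :: ps) vs a? (some s)
            = (s.isPrefixOf vs && pmDfs ps (vs.drop s.length) a? (some s)) := by
          simp [pmDfs, hp]
        rw [hdfs, Bool.and_eq_true, ih]
        simp only [Option.isSome_some, Bool.true_or, hA1, hB1]
        constructor
        · rintro ⟨hpre, α, β, hca, hcb, hex, hlive⟩
          have hs : s = β := hcb s rfl
          refine ⟨α, β, hca, hcb, ?_, hlive⟩
          have hexp : pmExpand α β (p :: ps) = β ++ pmExpand α β ps := by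
            simp [pmExpand, hp]
          rw [hexp, hex, ← hs]
          exact ((pm_append_eq_iff s (vs.drop s.length) vs).mpr ⟨hpre, rfl⟩)
        · rintro ⟨α, β, hca, hcb, hex, hlive⟩
          have hs : s = β := hcb s rfl
          have hexp : pmExpand α β (p :: ps) = β ++ pmExpand α β ps := by
            simp [pmExpand, hp]
          have hex' : s ++ pmExpand α β ps = vs := by rw [hs]; rw [hexp] at hex; exact hex
          obtain ⟨hpre, hdrop⟩ := (pm_append_eq_iff s (pmExpand α β ps) vs).mp hex'
          exact ⟨hpre, α, β, hca, hcb, hdrop, hlive⟩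
      | none =>
        have hdfs : pmDfs (p :: ps) vs a? none
            = ((List.range (vs.length + 1)).any fun j =>
                pmDfs ps (vs.drop j) a? (some (vs.take j))) := by
          simp [pmDfs, hp]
        rw [hdfs, List.any_eq_true]
        simp only [Option.isSome_none, Bool.false_or, hA1, hB1]
        constructor
        · rintro ⟨j, hj, hd⟩
          rw [ih] at hd
          obtain ⟨α, β, hca, hcb, hex, hlive⟩ := hd
          have hβ : vs.take j = β := hcb _ rfl
          refine ⟨α, β, hca, (by intro x hx; cases hx), ?_, ?_⟩
          · have hexp : pmExpand α β (p :: ps) = β ++ pmExpand α β ps := by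
              simp [pmExpand, hp]
            rw [hexp, hex, ← hβ, List.take_append_drop]
          · have hl := hlive
            simp only [Option.isSome_some, Bool.true_or] at hl
            exact ⟨fun h1 h2 => hl.1 h1 rfl, Or.inr rfl⟩
        · rintro ⟨α, β, hca, _, hex, hlive⟩
          have hexp : pmExpand α β (p :: ps) = β ++ pmExpand α β ps := by
            simp [pmExpand, hp]
          rw [hexp] at hex
          refine ⟨β.length, ?_, ?_⟩
          · have := congrArg List.length hex
            simp at this
            simp [List.mem_range]
            omega
          · rw [ih]
            have h1 : vs.take β.length = β := by
              rw [← hex, List.take_append_of_le_length (le_refl _), List.take_length]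
            have h2 : vs.drop β.length = pmExpand α β ps := by
              rw [← hex, List.drop_left]
            refine ⟨α, β, hca, ?_, h2.symm ▸ rfl, ?_⟩
            · intro x hx; injection hx with hx'; rw [← hx', h1]
            · have hl := hlive
              exact ⟨fun h1' h2' => hl.1 h1' rfl, Or.inr rfl⟩

lemma pmDfs_top_iff (ps vs : List Char) (ha : 'a' ∈ ps) (hb : 'b' ∈ ps) :
    pmDfs ps vs none none = true ↔ ∃ α β, α ≠ β ∧ pmExpand α β ps = vs := by
  have hsa : ps.any (· == 'a') = true := List.any_eq_true.mpr ⟨'a', ha, by simp⟩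
  have hsb : ps.any (· != 'a') = true := List.any_eq_true.mpr ⟨'b', hb, by decide⟩
  rw [pmDfs_iff]
  simp only [Option.isSome_none, Bool.false_or, hsa, hsb]
  constructor
  · rintro ⟨α, β, _, _, hex, hlive⟩
    exact ⟨α, β, hlive.1 rfl rfl, hex⟩
  · rintro ⟨α, β, hne, hex⟩
    exact ⟨α, β, (by intro x hx; cases hx), (by intro x hx; cases hx), hex,
      ⟨(fun _ _ => hne), Or.inl rfl⟩⟩

-- ===== VERDICT (by name: the statement is the Claim_ definition above) =====
theorem patternMatching_spec : Claim_equal_patternMatching := by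
  intro pattern value hdom hpre
  unfold Spec_patternMatching patternMatching patternMatching_alt
  set ps := pattern.toList with hpsdef
  set vs := value.toList with hvsdef
  by_cases hps0 : ps = []
  · rw [if_pos hps0, if_pos hps0]
    cases vs <;> simp
  · rw [if_neg hps0, if_neg hps0]
    have hsz : (PySem.Dict.counter ps).size = (PySem.Set.ofList ps).length := by
      have h1 : (PySem.Dict.counter ps).keys.length = (PySem.Dict.counter ps).size := by
        simp [PySem.Dict.keys, PySem.Dict.size]
      rw [← h1, PySem.Dict.keys_counter]
    have hlen : PySem.Set.len (PySem.Set.ofList ps) = ((PySem.Set.ofList ps).length : Int) := by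
      simp [PySem.Set.len, PySem.List.len_eq]
    by_cases h1 : (PySem.Set.ofList ps).length = 1
    · -- single-distinct-character branch
      have hA1 : (PySem.Dict.counter ps).size = 1 := by rw [hsz, h1]
      have hB1 : PySem.Set.len (PySem.Set.ofList ps) = (1 : Int) := by rw [hlen, h1]; norm_num
      rw [if_pos hA1, if_pos hB1]
      rw [PySem.List.len_eq vs, PySem.List.len_eq ps,
          PySem.Int.floordiv_natCast, PySem.Int.mod_natCast]
      have hpl0 : 0 < ps.length :=
        Nat.pos_of_ne_zero (fun h => hps0 (List.eq_nil_of_length_eq_zero h))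
      by_cases hmod : vs.length % ps.length = 0
      · have hdvd : vs.length / ps.length * ps.length = vs.length :=
          Nat.div_mul_cancel (Nat.dvd_of_mod_eq_zero hmod)
        have hcond : ¬ ((vs.length / ps.length : Nat) : Int) * (ps.length : Int) ≠ (vs.length : Int) := by
          intro hne
          exact hne (by exact_mod_cast hdvd)
        rw [if_neg hcond]
        have hbeq : (((vs.length % ps.length : Nat) : Int) == 0) = true := by
          rw [hmod]; norm_num
        dsimp only
        rw [hbeq, Bool.true_and]
        have hsl0 : PySem.List.slice vs (some 0) (some ((vs.length / ps.length : Nat) : Int)) =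
            vs.take (vs.length / ps.length) := by
          rw [PySem.List.slice_zero_start, PySem.List.slice_to_natCast]
        have hslB : PySem.List.slice vs none (some ((vs.length / ps.length : Nat) : Int)) =
            vs.take (vs.length / ps.length) := by
          rw [PySem.List.slice_to_natCast]
        rw [hsl0, hslB]
        exact pm_single vs (vs.length / ps.length) ps.length hpl0 (by omega)
      · have hcond : ((vs.length / ps.length : Nat) : Int) * (ps.length : Int) ≠ (vs.length : Int) := by
          intro h
          have hq : vs.length / ps.length * ps.length = vs.length := by exact_mod_cast h
          have h2 := Nat.div_add_mod vs.length ps.length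
          have h3 : ps.length * (vs.length / ps.length) = vs.length / ps.length * ps.length :=
            Nat.mul_comm _ _
          omega
        rw [if_pos hcond]
        have hbeq : (((vs.length % ps.length : Nat) : Int) == 0) = false := by
          have hne : ((vs.length % ps.length : Nat) : Int) ≠ 0 := by exact_mod_cast hmod
          exact beq_eq_false_iff_ne.mpr hne
        dsimp only
        rw [hbeq, Bool.false_and]
    · -- two-letter branch
      have hA1 : ¬ (PySem.Dict.counter ps).size = 1 := by rw [hsz]; exact h1
      have hB1 : ¬ PySem.Set.len (PySem.Set.ofList ps) = (1 : Int) := by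
        rw [hlen]; exact_mod_cast h1
      rw [if_neg hA1, if_neg hB1]
      -- pattern is nonempty with ≥ 2 distinct characters, all of them 'a' or 'b'
      have hge1 : 1 ≤ (PySem.Set.ofList ps).length := by
        obtain ⟨c, hc⟩ := List.exists_mem_of_ne_nil ps hps0
        have hc' : c ∈ PySem.Set.ofList ps := by
          rw [PySem.Set.mem_ofList]; exact hc
        have := List.length_pos_of_mem hc'
        omega
      have h2 : 2 ≤ (PySem.Set.ofList ps).length := by omega
      unfold Pre_patternMatching at hpre
      rw [← hpsdef] at hpre
      have hab : ∀ c ∈ ps, c = 'a' ∨ c = 'b' := by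
        rcases hpre with h | h
        · omega
        · intro c hc
          have := List.all_eq_true.mp h c hc
          simpa using this
      obtain ⟨hma, hmb⟩ := pm_two_of_ab ps hab h2
      have hca0 : 0 < List.count 'a' ps := List.count_pos_iff.mpr hma
      have hcb0 : 0 < List.count 'b' ps := List.count_pos_iff.mpr hmb
      dsimp only
      rw [PySem.Dict.getD_counter ps 'a', PySem.Dict.getD_counter ps 'b',
          PySem.List.len_eq vs, PySem.Int.floordiv_natCast]
      set ca := List.count 'a' ps with hcadef
      set cb := List.count 'b' ps with hcbdef
      rw [Bool.eq_iff_iff, pmDfs_top_iff ps vs hma hmb, List.any_eq_true]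
      constructor
      · -- A's loop found a candidate → witnesses exist
        rintro ⟨x, hx, hbody⟩
        obtain ⟨hx0, hx1⟩ := PySem.List.mem_pyRange_one.mp hx
        obtain ⟨al, rfl⟩ : ∃ al : Nat, x = (al : Int) := ⟨x.toNat, (Int.toNat_of_nonneg hx0).symm⟩
        have hal : al ≤ vs.length / ca := by exact_mod_cast Int.lt_add_one_iff.mp hx1
        have hle : ca * al ≤ vs.length := by
          have := (Nat.le_div_iff_mul_le hca0).mp hal
          calc ca * al = al * ca := Nat.mul_comm _ _
            _ ≤ vs.length := this
        have hsub : ((vs.length : Int) - (ca : Int) * (al : Int)) =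
            ((vs.length - ca * al : Nat) : Int) := by
          rw [Nat.cast_sub hle]; push_cast; ring
        rw [hsub, PySem.Int.floordiv_natCast] at hbody
        set bl := (vs.length - ca * al) / cb with hbldef
        by_cases hcond : (al : Int) * (ca : Int) + ((bl : Nat) : Int) * ((cb : Nat) : Int) ≠ (vs.length : Int)
        · rw [if_pos hcond] at hbody; cases hbody
        · rw [if_neg hcond] at hbody
          push_neg at hcond
          have hsumeq : al * ca + bl * cb = vs.length := by exact_mod_cast hcond
          have hAx : pmScanA vs (al : Int) (bl : Int) ps [] [] (0 : Int)
              = pmScanN vs al bl ps [] [] 0 := by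
            exact_mod_cast pmScanA_cast vs al bl ps [] [] 0
          rw [hAx] at hbody
          have hsum : vs.length ≤ ca * al + cb * bl := by
            rw [Nat.mul_comm ca al, Nat.mul_comm cb bl]; omega
          rw [pm_candidate vs ps al bl hma hmb hsum] at hbody
          simp only [Bool.and_eq_true, bne_iff_ne, ne_eq, beq_iff_eq] at hbody
          exact ⟨_, _, hbody.1, hbody.2.symm⟩
      · -- witnesses exist → A's loop succeeds at a_len = |α|
        rintro ⟨α, β, hne, hex⟩
        set al := α.length with haldef
        set bl := β.length with hbldef
        have hcnb : cb = ps.countP (· != 'a') := pm_count_ab ps hab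
        have hvlen : vs.length = ca * al + cb * bl := by
          rw [← hex, pmExpand_length, pm_sum_wdt', ← hcnb]
        have hle : ca * al ≤ vs.length := by omega
        refine ⟨(al : Int), ?_, ?_⟩
        · apply PySem.List.mem_pyRange_one.mpr
          refine ⟨by positivity, ?_⟩
          have hal : al ≤ vs.length / ca :=
            (Nat.le_div_iff_mul_le hca0).mpr (by rw [Nat.mul_comm al ca]; omega)
          have : (al : Int) ≤ ((vs.length / ca : Nat) : Int) := by exact_mod_cast hal
          omega
        · have hsub : ((vs.length : Int) - (ca : Int) * (al : Int)) =
              ((cb * bl : Nat) : Int) := by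
            rw [hvlen]; push_cast; ring
          rw [hsub, PySem.Int.floordiv_natCast, Nat.mul_div_cancel_left bl hcb0]
          have hcond : ¬ ((al : Int) * (ca : Int) + ((bl : Nat) : Int) * ((cb : Nat) : Int) ≠ (vs.length : Int)) := by
            push_neg
            rw [hvlen]; push_cast; ring
          rw [if_neg hcond]
          have hAx : pmScanA vs (al : Int) (bl : Int) ps [] [] (0 : Int)
              = pmScanN vs al bl ps [] [] 0 := by
            exact_mod_cast pmScanA_cast vs al bl ps [] [] 0
          rw [hAx]
          have hsum : vs.length ≤ ca * al + cb * bl := le_of_eq hvlen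
          rw [pm_candidate vs ps al bl hma hmb hsum]
          have hsegA : pmSeg vs (ps.idxOf 'a' * bl) al = α := by
            rw [← hex, ← List.append_nil (pmExpand α β ps)]
            exact pmSeg_expand_a α β ps [] hma
          have hsegB : pmSeg vs (ps.findIdx (· != 'a') * al) bl = β := by
            rw [← hex, ← List.append_nil (pmExpand α β ps)]
            exact pmSeg_expand_b α β ps [] ⟨'b', hmb, by decide⟩
          dsimp only
          rw [hsegA, hsegB, hex]
          simp [hne]
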